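-- pv_equiv track=rewrite | github.com/alexandraback/datacollection | solutions_5769900270288896_0/Python/simson/B.py | noisyness
-- ===== SOURCE A (Python) =====
-- def get(w, x, y, r, c):
-- 	if x<0 or y<0 or x==c or y==r:
-- 		return 0
-- 	return (w >> (y*c + x)) & 1
--
-- def noisyness(w,r,c):
-- 	n=0
-- 	for x in range(c):
-- 		for y in range(r):
-- 			if get(w,x,y,r,c)==0:
-- 				continue
-- 			n +=get(w, x - 1, y    , r, c) +\
-- 			    get(w, x    , y - 1, r, c)
-- 	return n
-- ===== SOURCE B (Python) =====
-- def noisyness(w, r, c):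
--     # Row-at-a-time bit-parallel count: horizontal pairs via row & (row >> 1),
--     # vertical pairs via row & previous_row, using popcounts instead of per-cell scans.
--     if c <= 0:
--         return 0
--     full = (1 << c) - 1
--     total = 0
--     prev = 0
--     for i in range(r):
--         row = (w >> (i * c)) & full
--         total += bin(row & (row >> 1)).count("1") + bin(row & prev).count("1")
--         prev = row
--     return total
-- ===== Notes on version B (the rewrite author's own statement) =====
-- stated objective: faster
-- what changed: Replaces the per-cell nested x/y scan with its three guarded bit lookups per cell by a single pass over rows that counts horizontal pairs as popcount(row & (row >> 1)) and vertical pairs as popcount(row & previous_row).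
import Mathlib
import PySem

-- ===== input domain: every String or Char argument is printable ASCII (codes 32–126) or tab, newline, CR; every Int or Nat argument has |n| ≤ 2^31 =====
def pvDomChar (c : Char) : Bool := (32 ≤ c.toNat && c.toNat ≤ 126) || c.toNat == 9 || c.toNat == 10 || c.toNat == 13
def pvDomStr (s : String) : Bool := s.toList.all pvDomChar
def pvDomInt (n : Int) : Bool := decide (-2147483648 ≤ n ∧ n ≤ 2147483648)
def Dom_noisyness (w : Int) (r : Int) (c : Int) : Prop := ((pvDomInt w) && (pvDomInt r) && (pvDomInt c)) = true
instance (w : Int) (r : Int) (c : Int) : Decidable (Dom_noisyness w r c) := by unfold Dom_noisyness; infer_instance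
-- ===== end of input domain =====

-- B replaces A's per-cell double loop (one bit test plus two neighbour tests per cell)
-- by a single pass over rows with bit-parallel popcounts: horizontal adjacencies of a
-- row are popcount(row & (row >> 1)), vertical ones are popcount(row & previous_row).

-- ===== PORT A =====
-- In every call noisyness makes, the shift amount y*c + x is nonnegative, so .toNat is exact.
def pyGet (w : Int) (x : Int) (y : Int) (r : Int) (c : Int) : Int :=
  if x < 0 ∨ y < 0 ∨ x = c ∨ y = r then 0
  else PySem.Int.band (w >>> (y * c + x).toNat) 1

def noisyness (w : Int) (r : Int) (c : Int) : Int :=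
  (PySem.List.pyRange 0 c 1).foldl (fun n x =>
    (PySem.List.pyRange 0 r 1).foldl (fun n y =>
      if pyGet w x y r c = 0 then n
      else n + pyGet w (x - 1) y r c + pyGet w x (y - 1) r c) n) 0

-- ===== PORT B =====
-- bin(v).count("1") on the nonnegative ints v = row & … is the popcount, PySem.Int.bitCount.
def noisyness_alt (w : Int) (r : Int) (c : Int) : Int :=
  if c ≤ 0 then 0
  else
    let full : Int := (1 <<< c.toNat) - 1
    let st := (PySem.List.pyRange 0 r 1).foldl
      (fun (st : Int × Int) i =>
        let row := PySem.Int.band (w >>> (i * c).toNat) full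
        (st.1 + (PySem.Int.bitCount (PySem.Int.band row (row >>> 1)) : Int)
              + (PySem.Int.bitCount (PySem.Int.band row st.2) : Int), row))
      (0, 0)
    st.1

-- ===== PRECONDITION & SPEC =====
def Spec_noisyness (w : Int) (r : Int) (c : Int) (out : Int) : Prop := out = noisyness_alt w r c
instance (w : Int) (r : Int) (c : Int) (out : Int) : Decidable (Spec_noisyness w r c out) := by unfold Spec_noisyness; infer_instance

-- ===== CLAIM (what is proved, stated in full; the proofs are below) =====
def Claim_equal_noisyness : Prop := ∀ (w : Int) (r : Int) (c : Int), Dom_noisyness w r c → Spec_noisyness w r c (noisyness w r c)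

-- ===== LEMMAS AND PROOFS =====

/-- Bit k of the two's-complement expansion of `w`, as an integer 0 or 1. -/
def wbit (w : Int) (k : Nat) : Int := w / 2 ^ k % 2

theorem wbit01 (w : Int) (k : Nat) : wbit w k = 0 ∨ wbit w k = 1 := Int.emod_two_eq _

/-- The row-y word of the grid: bits y*C … y*C+C-1 of `w`, as a natural number. -/
def mrow (w : Int) (C : Nat) (y : Nat) : Nat := ((w / 2 ^ (y * C)) % 2 ^ C).toNat

/-- The row word exactly as port B computes it. -/
def rowI (w c : Int) (y : Nat) : Int :=
  PySem.Int.band (w >>> ((y : Int) * c).toNat) ((1 <<< c.toNat) - 1)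

/-- Horizontal contribution of cell (x, y) in A's scan, written over bit indices. -/
def hterm (w : Int) (C : Nat) (x y : Nat) : Int :=
  if wbit w (y * C + x) = 0 then 0 else if x = 0 then 0 else wbit w (y * C + x - 1)

/-- Vertical contribution of cell (x, y) in A's scan, written over bit indices. -/
def vterm (w : Int) (C : Nat) (x y : Nat) : Int :=
  if wbit w (y * C + x) = 0 then 0 else if y = 0 then 0 else wbit w ((y - 1) * C + x)

theorem sum_range_list (n : Nat) (f : Nat → Int) :
    ∑ i ∈ Finset.range n, f i = ((List.range n).map f).sum := rfl

/-- popcount of a Nat below `2^N` as the sum of its bits. -/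
theorem pop_sum (N : Nat) : ∀ u : Nat, u < 2 ^ N →
    (PySem.Int.bitCount (u : Int) : Int) = ∑ x ∈ Finset.range N, ((u.testBit x).toNat : Int) := by
  induction N with
  | zero =>
    intro u hu
    interval_cases u
    simp [PySem.Int.bitCount_zero]
  | succ N ih =>
    intro u hu
    rcases Nat.eq_zero_or_pos u with h0 | h0
    · subst h0; simp [PySem.Int.bitCount_zero, Nat.zero_testBit]
    · rw [PySem.Int.bitCount_natCast h0]
      have hdiv : u / 2 < 2 ^ N := by
        have : u < 2 ^ N * 2 := by rw [← pow_succ]; exact hu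
        omega
      have := ih (u / 2) hdiv
      rw [Finset.sum_range_succ']
      simp only [Nat.testBit_add_one]
      rw [← this]
      have hb0 : ((u.testBit 0).toNat : Int) = (u % 2 : Nat) := by
        rw [Nat.testBit_zero]
        rcases Nat.mod_two_eq_zero_or_one u with h | h <;> simp [h]
      rw [hb0]
      push_cast
      ring

/-- Python's `a & ((1 << C) - 1)` is `a mod 2^C`, for every sign of `a`. -/
theorem band_mask (a : Int) (C : Nat) :
    PySem.Int.band a ((2 : Int) ^ C - 1) = a % 2 ^ C := by
  have h1 : (1:Nat) ≤ 2 ^ C := Nat.one_le_two_pow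
  have h1i : (1:Int) ≤ 2 ^ C := one_le_pow₀ (by norm_num)
  have htn : ((2:Int)^C - 1).toNat = 2 ^ C - 1 := by
    have : ((2:Int))^C = ((2 ^ C : Nat) : Int) := by push_cast; ring
    omega
  rcases le_or_gt 0 a with ha | ha
  · rw [PySem.Int.band, if_pos ha, if_pos (by omega)]
    rw [htn, Nat.and_two_pow_sub_one_eq_mod]
    have h2 : a = (a.toNat : Int) := (Int.toNat_of_nonneg ha).symm
    rw [h2]
    push_cast
    rfl
  · rw [PySem.Int.band, if_neg (by omega), if_pos (by omega)]
    set n : Nat := (-a - 1).toNat with hn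
    have han : a = -((n:Int) + 1) := by omega
    rw [htn, Nat.and_comm, Nat.and_two_pow_sub_one_eq_mod]
    have hmlt : n % 2 ^ C < 2 ^ C := Nat.mod_lt _ (by positivity)
    have hcast : ((2:Int)) ^ C = ((2 ^ C : Nat) : Int) := by push_cast; ring
    have hdm' : ((2 ^ C : Nat) : Int) * ((n / 2 ^ C : Nat) : Int) + ((n % 2 ^ C : Nat):Int) = (n : Int) := by
      exact_mod_cast congrArg (Nat.cast : Nat → Int) (Nat.div_add_mod n (2 ^ C))
    have hsub : ((2 ^ C - 1 - n % 2 ^ C : Nat) : Int) = ((2 ^ C : Nat) : Int) - 1 - ((n % 2 ^ C : Nat) : Int) := by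
      omega
    have hv : a = ((2 ^ C - 1 - n % 2 ^ C : Nat) : Int) + 2 ^ C * (-((n / 2 ^ C : Nat) : Int) - 1) := by
      rw [han, hsub, hcast]; linarith [hdm']
    calc ((2 ^ C - 1 - n % 2 ^ C : Nat) : Int)
        = ((2 ^ C - 1 - n % 2 ^ C : Nat) : Int) % 2 ^ C := by
          rw [Int.emod_eq_of_lt (by positivity) (by rw [hsub, hcast]; omega)]
      _ = (((2 ^ C - 1 - n % 2 ^ C : Nat) : Int) + 2 ^ C * (-((n / 2 ^ C : Nat) : Int) - 1)) % 2 ^ C := by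
          rw [Int.add_mul_emod_self_left]
      _ = a % 2 ^ C := by rw [← hv]

/-- Bit `x` of the masked value, read back from the original integer. -/
theorem testBit_mask (a : Int) (C x : Nat) (hx : x < C) :
    ((a % 2 ^ C).toNat).testBit x = decide (a / 2 ^ x % 2 = 1) := by
  have hpow : (0:Int) < 2 ^ C := by positivity
  have h0 : 0 ≤ a % 2 ^ C := Int.emod_nonneg a (by positivity)
  rw [Nat.testBit_eq_decide_div_mod_eq, decide_eq_decide]
  have hval : (((a % 2 ^ C).toNat / 2 ^ x % 2 : Nat) : Int) = a % 2 ^ C / 2 ^ x % 2 := by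
    push_cast [Int.toNat_of_nonneg h0]
    rfl
  have hkey : a % 2 ^ C / 2 ^ x % 2 = a / 2 ^ x % 2 := by
    have hsplit : (2:Int) ^ C = 2 ^ x * 2 ^ (C - x) := by
      rw [← pow_add]; congr 1; omega
    have hrw : a % 2 ^ C = a + (-(a / 2 ^ C) * 2 ^ (C - x)) * 2 ^ x := by
      rw [Int.emod_def]; ring_nf; rw [hsplit]; ring
    rw [hrw, Int.add_mul_ediv_right _ _ (by positivity : (0:Int) < 2^x).ne']
    have hCx : C - x = (C - x - 1) + 1 := by omega
    have : -(a / 2 ^ C) * 2 ^ (C - x) = (-(a / 2 ^ C) * 2 ^ (C - x - 1)) * 2 := by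
      nth_rewrite 1 [hCx]
      rw [pow_succ]; ring
    rw [this, Int.add_mul_emod_self_right]
  constructor <;> intro h
  · rw [← hkey]; exact_mod_cast hval ▸ congrArg (Nat.cast : Nat → Int) h
  · have : (((a % 2 ^ C).toNat / 2 ^ x % 2 : Nat) : Int) = 1 := by rw [hval, hkey, h]
    exact_mod_cast this

theorem rowI_eq (w c : Int) (hc : 0 < c) (y : Nat) :
    rowI w c y = ((mrow w c.toNat y : Nat) : Int) := by
  have hC : c = (c.toNat : Int) := by omega
  have h1 : ((1 <<< c.toNat : Nat) : Int) - 1 = (2 : Int) ^ c.toNat - 1 := by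
    rw [Nat.one_shiftLeft]; push_cast; ring
  have h2 : ((y : Int) * c).toNat = y * c.toNat := by
    conv_lhs => rw [hC]
    rw [← Nat.cast_mul, Int.toNat_natCast]
  rw [rowI, h1, h2, band_mask, Int.shiftRight_eq_div_pow, mrow,
    Int.toNat_of_nonneg (Int.emod_nonneg _ (by positivity))]
  push_cast
  ring_nf

theorem mrow_lt (w : Int) (C y : Nat) : mrow w C y < 2 ^ C := by
  have := Int.emod_lt_of_pos (w / 2 ^ (y * C)) (show (0:Int) < 2 ^ C by positivity)
  have h2 : ((2:Int) ^ C) = ((2 ^ C : Nat) : Int) := by push_cast; ring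
  rw [mrow]; omega

theorem mrow_testBit (w : Int) (C y x : Nat) (hx : x < C) :
    (mrow w C y).testBit x = decide (wbit w (y * C + x) = 1) := by
  rw [mrow, testBit_mask _ _ _ hx, wbit]
  congr 2
  rw [Int.ediv_ediv_of_nonneg (by positivity : (0:Int) ≤ 2 ^ (y*C)), ← pow_add]

theorem pyRange_toNat (r : Int) : PySem.List.pyRange 0 r 1 = PySem.List.pyRange 0 (r.toNat : Int) 1 := by
  rcases le_or_gt 0 r with h | h
  · rw [Int.toNat_of_nonneg h]
  · rw [PySem.List.pyRange_one_eq_nil (by omega), PySem.List.pyRange_one_eq_nil (by omega)]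

theorem B_fold (w c : Int) (R : Nat) :
    (PySem.List.pyRange 0 (R : Int) 1).foldl
      (fun (st : Int × Int) i =>
        let row := PySem.Int.band (w >>> (i * c).toNat) ((1 <<< c.toNat) - 1)
        (st.1 + (PySem.Int.bitCount (PySem.Int.band row (row >>> 1)) : Int)
              + (PySem.Int.bitCount (PySem.Int.band row st.2) : Int), row))
      (0, 0)
    = (∑ y ∈ Finset.range R,
         ((PySem.Int.bitCount (PySem.Int.band (rowI w c y) (rowI w c y >>> 1)) : Int)
          + (PySem.Int.bitCount (PySem.Int.band (rowI w c y) (if y = 0 then 0 else rowI w c (y - 1))) : Int)),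
       if R = 0 then 0 else rowI w c (R - 1)) := by
  induction R with
  | zero =>
    rw [show ((0 : Nat) : Int) = 0 from rfl, PySem.List.pyRange_one_eq_nil le_rfl]
    simp
  | succ R ih =>
    have hcast : ((R + 1 : Nat) : Int) = (R : Int) + 1 := by push_cast; ring
    rw [hcast, PySem.List.pyRange_one_succ_right (by positivity), List.foldl_append, ih]
    simp only [List.foldl_cons, List.foldl_nil]
    rw [Finset.sum_range_succ]
    simp only [rowI, Prod.mk.injEq, Nat.add_sub_cancel]
    refine ⟨by ring, by simp⟩

theorem H_core (w : Int) (C : Nat) (hC : 0 < C) (y : Nat) :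
    ∑ x ∈ Finset.range C, (((mrow w C y).testBit x && (mrow w C y).testBit (1 + x)).toNat : Int)
    = ∑ x ∈ Finset.range C, hterm w C x y := by
  obtain ⟨C', rfl⟩ : ∃ n, C = n + 1 := ⟨C - 1, by omega⟩
  rw [Finset.sum_range_succ, Finset.sum_range_succ']
  have hlast : (mrow w (C' + 1) y).testBit (1 + C') = false := by
    apply Nat.testBit_lt_two_pow
    rw [Nat.add_comm 1 C']
    exact mrow_lt w (C' + 1) y
  have h0 : hterm w (C' + 1) 0 y = 0 := by
    rw [hterm]; split_ifs <;> simp_all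
  rw [hlast, h0]
  simp only [Bool.and_false, Bool.toNat_false, Nat.cast_zero, add_zero]
  apply Finset.sum_congr rfl
  intro x hx
  have hx' : x < C' := Finset.mem_range.mp hx
  rw [mrow_testBit w (C' + 1) y x (by omega), mrow_testBit w (C' + 1) y (1 + x) (by omega)]
  rw [hterm]
  have e1 : y * (C' + 1) + (x + 1) - 1 = y * (C' + 1) + x := by omega
  have e2 : y * (C' + 1) + (x + 1) = y * (C' + 1) + (1 + x) := by omega
  rw [e1, e2]
  rcases wbit01 w (y * (C' + 1) + x) with hb1 | hb1 <;>
    rcases wbit01 w (y * (C' + 1) + (1 + x)) with hb2 | hb2 <;>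
      simp [hb1, hb2]

theorem H_row (w c : Int) (hc : 0 < c) (y : Nat) :
    (PySem.Int.bitCount (PySem.Int.band (rowI w c y) (rowI w c y >>> 1)) : Int)
    = ∑ x ∈ Finset.range c.toNat, hterm w c.toNat x y := by
  rw [rowI_eq w c hc y]
  rw [show ((mrow w c.toNat y : Nat) : Int) >>> (1 : Int)
      = ((mrow w c.toNat y >>> 1 : Nat) : Int) from by
    exact_mod_cast (Int.shiftRight_natCast (mrow w c.toNat y) 1).symm]
  rw [PySem.Int.band_natCast,
    pop_sum c.toNat _ (Nat.lt_of_le_of_lt Nat.and_le_left (mrow_lt w c.toNat y))]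
  simp only [Nat.testBit_and, Nat.testBit_shiftRight]
  exact H_core w c.toNat (by omega) y

theorem V_row (w c : Int) (hc : 0 < c) (y : Nat) :
    (PySem.Int.bitCount (PySem.Int.band (rowI w c y)
        (if y = 0 then 0 else rowI w c (y - 1))) : Int)
    = ∑ x ∈ Finset.range c.toNat, vterm w c.toNat x y := by
  rcases Nat.eq_zero_or_pos y with hy | hy
  · subst hy
    rw [if_pos rfl, PySem.Int.band_zero]
    rw [show PySem.Int.bitCount (0 : Int) = 0 from PySem.Int.bitCount_zero]
    symm
    apply Finset.sum_eq_zero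
    intro x _
    rw [vterm]; split_ifs <;> simp_all
  · rw [if_neg (by omega)]
    rw [rowI_eq w c hc y, rowI_eq w c hc (y - 1), PySem.Int.band_natCast,
      pop_sum c.toNat _ (Nat.lt_of_le_of_lt Nat.and_le_left (mrow_lt w c.toNat y))]
    apply Finset.sum_congr rfl
    intro x hx
    have hx' : x < c.toNat := Finset.mem_range.mp hx
    simp only [Nat.testBit_and]
    rw [mrow_testBit w c.toNat y x hx', mrow_testBit w c.toNat (y - 1) x hx']
    rw [vterm]
    have hyne : y ≠ 0 := by omega
    rcases wbit01 w (y * c.toNat + x) with hb1 | hb1 <;>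
      rcases wbit01 w ((y - 1) * c.toNat + x) with hb2 | hb2 <;>
        simp [hb1, hb2, hyne]

theorem toNat_idx (y c : Int) (hc : 0 ≤ c) (hy : 0 ≤ y) (x : Int) (hx : 0 ≤ x) :
    (y * c + x).toNat = y.toNat * c.toNat + x.toNat := by
  have h1 : y * c = (y.toNat : Int) * (c.toNat : Int) := by
    rw [Int.toNat_of_nonneg hy, Int.toNat_of_nonneg hc]
  rw [h1, ← Nat.cast_mul]
  omega

theorem pyGet_band (w : Int) (x y r c : Int) (hx : 0 ≤ x) (hx2 : x < c) (hy : 0 ≤ y) (hy2 : y < r) :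
    pyGet w x y r c = wbit w (y.toNat * c.toNat + x.toNat) := by
  rw [pyGet, if_neg (by omega), PySem.Int.band_one,
    PySem.Int.mod_eq_emod_of_pos (by norm_num), Int.shiftRight_eq_div_pow,
    toNat_idx y c (by omega) hy x hx, wbit]
  norm_num

theorem Aterm_eq (w r c : Int) (hc : 0 < c) (x y : Nat) (hx : x < c.toNat) (hy : y < r.toNat) :
    (if pyGet w (x : Int) (y : Int) r c = 0 then 0
     else pyGet w ((x : Int) - 1) (y : Int) r c + pyGet w (x : Int) ((y : Int) - 1) r c)
    = hterm w c.toNat x y + vterm w c.toNat x y := by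
  have hyr : (y : Int) < r := by omega
  have hxc : (x : Int) < c := by omega
  have hG1 : pyGet w (x : Int) (y : Int) r c = wbit w (y * c.toNat + x) := by
    rw [pyGet_band w _ _ r c (by omega) hxc (by omega) hyr]
    simp
  have hG2 : pyGet w ((x : Int) - 1) (y : Int) r c
      = if x = 0 then 0 else wbit w (y * c.toNat + x - 1) := by
    rcases Nat.eq_zero_or_pos x with h0 | h0
    · subst h0; rw [if_pos rfl, pyGet, if_pos (by norm_num)]
    · rw [if_neg (by omega)]
      rw [show (x : Int) - 1 = ((x - 1 : Nat) : Int) from by omega]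
      rw [pyGet_band w _ _ r c (by omega) (by omega) (by omega) hyr]
      simp only [Int.toNat_natCast]
      congr 1
      omega
  have hG3 : pyGet w (x : Int) ((y : Int) - 1) r c
      = if y = 0 then 0 else wbit w ((y - 1) * c.toNat + x) := by
    rcases Nat.eq_zero_or_pos y with h0 | h0
    · subst h0; rw [if_pos rfl, pyGet, if_pos (by norm_num)]
    · rw [if_neg (by omega)]
      rw [show (y : Int) - 1 = ((y - 1 : Nat) : Int) from by omega]
      rw [pyGet_band w _ _ r c (by omega) hxc (by omega) (by omega)]
      simp
  rw [hG1, hG2, hG3, hterm, vterm]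
  split_ifs <;> ring

theorem A_sum (w r c : Int) :
    noisyness w r c = ∑ x ∈ Finset.range c.toNat, ∑ y ∈ Finset.range r.toNat,
      (if pyGet w (x:Int) (y:Int) r c = 0 then 0
       else pyGet w ((x:Int) - 1) (y:Int) r c + pyGet w (x:Int) ((y:Int) - 1) r c) := by
  have hinner : ∀ (n x : Int),
      (PySem.List.pyRange 0 r 1).foldl (fun n y =>
        if pyGet w x y r c = 0 then n
        else n + pyGet w (x - 1) y r c + pyGet w x (y - 1) r c) n
      = n + ((PySem.List.pyRange 0 r 1).map (fun y =>
          if pyGet w x y r c = 0 then 0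
          else pyGet w (x - 1) y r c + pyGet w x (y - 1) r c)).sum := by
    intro n x
    rw [show (fun n y =>
        if pyGet w x y r c = 0 then n
        else n + pyGet w (x - 1) y r c + pyGet w x (y - 1) r c)
      = (fun n y => n + (if pyGet w x y r c = 0 then 0
          else pyGet w (x - 1) y r c + pyGet w x (y - 1) r c)) from by
        funext n y; split_ifs <;> ring]
    exact PySem.List.foldl_add _ _ n
  unfold noisyness
  rw [show (fun n x =>
      (PySem.List.pyRange 0 r 1).foldl (fun n y =>
        if pyGet w x y r c = 0 then n
        else n + pyGet w (x - 1) y r c + pyGet w x (y - 1) r c) n)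
    = (fun n x => n + ((PySem.List.pyRange 0 r 1).map (fun y =>
        if pyGet w x y r c = 0 then 0
        else pyGet w (x - 1) y r c + pyGet w x (y - 1) r c)).sum) from by
      funext n x; exact hinner n x]
  rw [PySem.List.foldl_add, zero_add]
  rw [PySem.List.pyRange_zero, PySem.List.pyRange_zero]
  simp only [sum_range_list, List.map_map]
  rfl

-- ===== VERDICT (by name: the statement is the Claim_ definition above) =====
theorem noisyness_spec : Claim_equal_noisyness := by
  intro w r c _
  unfold Spec_noisyness
  by_cases hc : c ≤ 0
  · unfold noisyness noisyness_alt
    rw [if_pos hc, PySem.List.pyRange_one_eq_nil hc]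
    rfl
  · replace hc : 0 < c := by omega
    rw [A_sum]
    rw [Finset.sum_congr rfl (fun x hx => Finset.sum_congr rfl (fun y hy =>
      Aterm_eq w r c hc x y (Finset.mem_range.mp hx) (Finset.mem_range.mp hy)))]
    rw [Finset.sum_comm]
    unfold noisyness_alt
    rw [if_neg (by omega)]
    show _ = ((PySem.List.pyRange 0 r 1).foldl
      (fun (st : Int × Int) i =>
        let row := PySem.Int.band (w >>> (i * c).toNat) ((1 <<< c.toNat) - 1)
        (st.1 + (PySem.Int.bitCount (PySem.Int.band row (row >>> 1)) : Int)
              + (PySem.Int.bitCount (PySem.Int.band row st.2) : Int), row))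
      (0, 0)).1
    rw [pyRange_toNat, B_fold]
    apply Finset.sum_congr rfl
    intro y _
    rw [Finset.sum_add_distrib, H_row w c hc y, V_row w c hc y]
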